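-- pv_equiv track=rewrite | github.com/The-King-12345/Advent-of-Code | 2024/day22/main.py | most_bananas
-- ===== SOURCE A (Python) =====
-- def get_next(num: int) -> int:
--     num = num ^ (num * 64) % 16777216
--     num = num ^ (num // 32) % 16777216
--     num = num ^ (num * 2048) % 16777216
--     return num
--
-- def most_bananas(lines: list[int], repetitions: int) -> int:
--     buyer_nums: list[list[int]] = []
--     for line in lines:
--         num = line
--         add_list: list[int] = [num % 10]
--         for _ in range(repetitions):
--             add_list.append(get_next(num) % 10)
--             num = get_next(num)
--         buyer_nums.append(add_list)
--
--     buyer_changes: list[list[int]] = []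
--     for nums in buyer_nums:
--         add_list = []
--         for curr, next in zip(nums, nums[1:]):
--             add_list.append(next-curr)
--         buyer_changes.append(add_list)
--
--     buyer_seqs: list[dict[tuple[int,...],int]] = []
--     seq_len = 4
--     for buyer_idx, nums in enumerate(buyer_changes):
--         add_dict: dict[tuple[int,...],int] = {}
--         for i in range(len(nums) - seq_len + 1):
--             seq = tuple(nums[i:i+seq_len])
--             if seq not in add_dict:
--                 add_dict[seq] = buyer_nums[buyer_idx][i + seq_len]
--         buyer_seqs.append(add_dict)
--
--     used: set[tuple[int,...]] = set()
--     highest = 0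
--
--     for seqs in buyer_seqs:
--         for seq in seqs:
--             if seq in used:
--                 continue
--             used.add(seq)
--             highest = max(highest, count_gain(buyer_seqs, seq))
--
--     return highest
--
-- def count_gain(buyer_seqs: list[dict[tuple[int,...],int]], seq: tuple[int,...]) -> int:
--     res = 0
--     for seqs in buyer_seqs:
--         if seq in seqs:
--             res += seqs[seq]
--     return res
-- ===== SOURCE B (Python) =====
-- def get_next(num: int) -> int:
--     num = num ^ (num * 64) % 16777216
--     num = num ^ (num // 32) % 16777216
--     num = num ^ (num * 2048) % 16777216
--     return num
--
-- def most_bananas(lines: list[int], repetitions: int) -> int: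
--     # One global dict seq -> total bananas, filled in a single pass over the
--     # buyers; per buyer each sequence counts only at its first occurrence.
--     totals: dict[tuple[int, ...], int] = {}
--     for line in lines:
--         secrets = [line]
--         for _ in range(repetitions):
--             secrets.append(get_next(secrets[-1]))
--         prices = [s % 10 for s in secrets]
--         seen: set[tuple[int, ...]] = set()
--         for i in range(len(prices) - 4):
--             seq = (prices[i + 1] - prices[i], prices[i + 2] - prices[i + 1],
--                    prices[i + 3] - prices[i + 2], prices[i + 4] - prices[i + 3])
--             if seq not in seen:
--                 seen.add(seq)
--                 totals[seq] = totals.get(seq, 0) + prices[i + 4]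
--     best = 0
--     for v in totals.values():
--         best = max(best, v)
--     return best
-- ===== Notes on version B (the rewrite author's own statement) =====
-- stated objective: faster
-- what changed: B accumulates sequence->total bananas in one global dict during a single pass over the buyers (first occurrence per buyer) and returns the max of its values, instead of A's per-buyer list of dicts followed by a rescan of all buyers (count_gain) for every distinct sequence; intended as faster (O(B*reps) vs O(B^2*reps)), measured 4.9-45x on a timing run's sizes where both finished (unconfirmed at the largest size: both scale with reps and both timed out there).
import Mathlib
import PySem

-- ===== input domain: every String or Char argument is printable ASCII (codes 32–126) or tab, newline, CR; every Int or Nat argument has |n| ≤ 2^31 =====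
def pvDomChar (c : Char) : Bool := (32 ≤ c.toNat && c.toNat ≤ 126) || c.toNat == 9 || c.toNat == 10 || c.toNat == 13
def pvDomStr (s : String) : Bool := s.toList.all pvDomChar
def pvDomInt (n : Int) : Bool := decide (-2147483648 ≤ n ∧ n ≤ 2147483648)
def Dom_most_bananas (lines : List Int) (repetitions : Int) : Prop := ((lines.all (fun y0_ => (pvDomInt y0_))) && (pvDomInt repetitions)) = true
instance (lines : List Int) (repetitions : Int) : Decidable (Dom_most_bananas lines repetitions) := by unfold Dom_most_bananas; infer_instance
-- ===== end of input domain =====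

-- B replaces A's per-buyer list of dicts plus the quadratic cross-buyer
-- count_gain rescans by one global dict seq -> total filled in a single pass,
-- then takes the max of its values (objective: faster; intended O(B*reps) vs
-- O(B^2*reps), measured 4.9-45x in a timing run on the sizes both finished).

-- ===== PORT A =====
def get_next (num : Int) : Int :=
  let n1 := PySem.Int.bxor num (PySem.Int.mod (num * 64) 16777216)
  let n2 := PySem.Int.bxor n1 (PySem.Int.mod (PySem.Int.floordiv n1 32) 16777216)
  PySem.Int.bxor n2 (PySem.Int.mod (n2 * 2048) 16777216)

def count_gain (buyer_seqs : List (PySem.Dict (List Int) Int)) (seq : List Int) : Int :=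
  buyer_seqs.foldl (fun res seqs => if seqs.contains seq then res + seqs.getD seq 0 else res) 0

def most_bananas (lines : List Int) (repetitions : Int) : Int :=
  let buyer_nums : List (List Int) := lines.foldl (fun acc line =>
    let st := (PySem.List.pyRange 0 repetitions 1).foldl
      (fun (st : List Int × Int) _ =>
        (st.1 ++ [PySem.Int.mod (get_next st.2) 10], get_next st.2))
      ([PySem.Int.mod line 10], line)
    acc ++ [st.1]) []
  let buyer_changes : List (List Int) := buyer_nums.foldl (fun acc nums =>
    acc ++ [(nums.zip (PySem.List.slice nums (some 1) none)).foldl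
      (fun al p => al ++ [p.2 - p.1]) []]) []
  -- seq_len = 4 inlined
  let buyer_seqs : List (PySem.Dict (List Int) Int) :=
    (PySem.List.enumerate buyer_changes 0).foldl (fun acc p =>
      let add_dict := (PySem.List.pyRange 0 ((p.2.length : Int) - 4 + 1) 1).foldl
        (fun (d : PySem.Dict (List Int) Int) i =>
          let seq := PySem.List.slice p.2 (some i) (some (i + 4))
          if d.contains seq then d
          else d.insert seq (PySem.List.pyGetD (PySem.List.pyGetD buyer_nums p.1 []) (i + 4) 0))
        PySem.Dict.empty
      acc ++ [add_dict]) []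
  let st := buyer_seqs.foldl
    (fun (st : PySem.Set (List Int) × Int) seqs =>
      seqs.keys.foldl
        (fun (st : PySem.Set (List Int) × Int) seq =>
          if st.1.contains seq then st
          else (st.1.add seq, max st.2 (count_gain buyer_seqs seq)))
        st)
    (([] : PySem.Set (List Int)), 0)
  st.2

-- ===== PORT B =====
def most_bananas_alt (lines : List Int) (repetitions : Int) : Int :=
  let totals : PySem.Dict (List Int) Int := lines.foldl
    (fun (totals : PySem.Dict (List Int) Int) line =>
      let secrets : List Int := (PySem.List.pyRange 0 repetitions 1).foldl
        (fun s _ => s ++ [get_next (PySem.List.pyGetD s (-1) 0)]) [line]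
      let prices : List Int := secrets.map (fun s => PySem.Int.mod s 10)
      let p : Int → Int := fun j => PySem.List.pyGetD prices j 0
      let st := (PySem.List.pyRange 0 ((prices.length : Int) - 4) 1).foldl
        (fun (st : PySem.Set (List Int) × PySem.Dict (List Int) Int) i =>
          let seq := [p (i+1) - p i, p (i+2) - p (i+1), p (i+3) - p (i+2), p (i+4) - p (i+3)]
          if st.1.contains seq then st
          else (st.1.add seq, st.2.insert seq (st.2.getD seq 0 + p (i+4))))
        (([] : PySem.Set (List Int)), totals)
      st.2)
    PySem.Dict.empty
  totals.values.foldl (fun best v => max best v) 0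

-- ===== PRECONDITION & SPEC =====
def Spec_most_bananas (lines : List Int) (repetitions : Int) (out : Int) : Prop := out = most_bananas_alt lines repetitions
instance (lines : List Int) (repetitions : Int) (out : Int) : Decidable (Spec_most_bananas lines repetitions out) := by unfold Spec_most_bananas; infer_instance

-- ===== CLAIM (what is proved, stated in full; the proofs are below) =====
def Claim_equal_most_bananas : Prop := ∀ (lines : List Int) (repetitions : Int), Dom_most_bananas lines repetitions → Spec_most_bananas lines repetitions (most_bananas lines repetitions)

-- ===== LEMMAS AND PROOFS =====

def iterN (num : Int) : Nat → Int
  | 0 => num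
  | n+1 => get_next (iterN num n)

def pr (line : Int) (j : Nat) : Int := PySem.Int.mod (iterN line j) 10
def chg (line : Int) (k : Nat) : Int := pr line (k+1) - pr line k
def seqAt (line : Int) (k : Nat) : List Int :=
  [chg line k, chg line (k+1), chg line (k+2), chg line (k+3)]
def stream (line : Int) (n : Nat) : List (List Int × Int) :=
  (List.range (n-3)).map (fun k => (seqAt line k, pr line (k+4)))

def firsts (seen : List Int → Bool) : List (List Int × Int) → List (List Int × Int)
  | [] => []
  | q :: ps => if seen q.1 then firsts seen ps
               else q :: firsts (fun k => k == q.1 || seen k) ps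

def Fb (line : Int) (n : Nat) : List (List Int × Int) :=
  firsts (fun _ => false) (stream line n)

def Pstream (lines : List Int) (n : Nat) : List (List Int × Int) :=
  (lines.map (fun line => Fb line n)).flatten

def sumKey (ps : List (List Int × Int)) (k : List Int) : Int :=
  ((ps.filter (fun q => q.1 == k)).map (·.2)).sum

-- first-occurrence filter of a key stream
def firstsK (seen : List Int → Bool) : List (List Int) → List (List Int)
  | [] => []
  | k :: ks => if seen k then firstsK seen ks
               else k :: firstsK (fun j => j == k || seen j) ks

theorem secrets_fold (line : Int) (n : Nat) :
    (List.range n).foldl (fun s _ => s ++ [get_next (PySem.List.pyGetD s (-1) 0)]) [line]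
      = (List.range (n+1)).map (iterN line) := by
  induction n with
  | zero => simp [iterN]
  | succ m ih =>
    rw [List.range_succ, List.foldl_append, ih]
    rw [show (List.range (m+1)).map (iterN line) = (List.range m).map (iterN line) ++ [iterN line m] from by
      rw [List.range_succ, List.map_append]; simp]
    simp [PySem.List.pyGetD_neg_one_append_singleton]
    rw [List.range_succ, List.range_succ, List.map_append, List.map_append]
    simp [iterN]

theorem set_contains_add (s : PySem.Set (List Int)) (x : List Int) :
    (s.add x).contains = fun k => k == x || s.contains k := by
  funext k
  by_cases hx : x ∈ s
  · rw [PySem.Set.add_of_mem hx]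
    by_cases hk : k = x
    · subst hk; simp [hx]
    · simp [hk]
  · rw [PySem.Set.add_of_not_mem hx]
    simp only [PySem.Set.contains_eq_listContains]
    by_cases hk : k = x
    · subst hk; simp
    · simp [hk]

theorem bstep_firsts (ps : List (List Int × Int)) (s : PySem.Set (List Int))
    (t : PySem.Dict (List Int) Int) :
    (ps.foldl (fun st q => if st.1.contains q.1 then st
        else (st.1.add q.1, st.2.insert q.1 (st.2.getD q.1 0 + q.2))) (s, t)).2
      = (firsts (fun k => s.contains k) ps).foldl
          (fun t q => t.insert q.1 (t.getD q.1 0 + q.2)) t := by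
  induction ps generalizing s t with
  | nil => simp [firsts]
  | cons q ps ih =>
    by_cases hc : s.contains q.1
    · simp only [List.foldl_cons, firsts, hc, if_true]
      exact ih s t
    · simp only [List.foldl_cons, firsts, hc, if_false, Bool.false_eq_true]
      rw [ih]
      have hfun : (fun k => (s.add q.1).contains k) = (fun k => k == q.1 || s.contains k) := by
        rw [set_contains_add]
      rw [hfun]

def pricesL (line : Int) (n : Nat) : List Int := (List.range (n+1)).map (pr line)

theorem prices_eq (line : Int) (n : Nat) :
    ((List.range (n+1)).map (iterN line)).map (fun s => PySem.Int.mod s 10) = pricesL line n := by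
  rw [List.map_map]; rfl

theorem pricesL_getD (line : Int) (n j : Nat) (h : j ≤ n) :
    PySem.List.pyGetD (pricesL line n) ((j : Nat) : Int) 0 = pr line j := by
  rw [PySem.List.pyGetD_natCast]
  exact PySem.List.getD_map_range (pr line) (n+1) j 0 (by omega)

-- per-buyer B loop over positions = fold over the (seq, price) stream
theorem bloop_stream (line : Int) (n : Nat) (s : PySem.Set (List Int))
    (t : PySem.Dict (List Int) Int) :
    ((PySem.List.pyRange 0 (((pricesL line n).length : Int) - 4) 1).foldl
        (fun (st : PySem.Set (List Int) × PySem.Dict (List Int) Int) i =>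
          let p : Int → Int := fun j => PySem.List.pyGetD (pricesL line n) j 0
          let seq := [p (i+1) - p i, p (i+2) - p (i+1), p (i+3) - p (i+2), p (i+4) - p (i+3)]
          if st.1.contains seq then st
          else (st.1.add seq, st.2.insert seq (st.2.getD seq 0 + p (i+4)))) (s, t))
      = (stream line n).foldl
          (fun st q => if st.1.contains q.1 then st
            else (st.1.add q.1, st.2.insert q.1 (st.2.getD q.1 0 + q.2))) (s, t) := by
  have hlen : ((pricesL line n).length : Int) - 4 = (n : Int) - 3 := by
    simp [pricesL]; ring
  rw [hlen, PySem.List.pyRange_one]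
  have htn : ((n : Int) - 3 - 0).toNat = n - 3 := by omega
  rw [htn, List.foldl_map]
  unfold stream
  rw [List.foldl_map]
  apply PySem.List.foldl_congr_mem
  intro acc k hk
  have hk4 : k + 4 ≤ n := by
    have := List.mem_range.mp hk; omega
  have hz : (0 : Int) + (k : Int) = ((k : Nat) : Int) := by ring
  have hg : ∀ (j : Nat), k + j ≤ n →
      PySem.List.pyGetD (pricesL line n) (((k : Nat) : Int) + (j : Int)) 0 = pr line (k + j) := by
    intro j hj
    have : ((k : Nat) : Int) + (j : Int) = (((k + j : Nat)) : Int) := by push_cast; ring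
    rw [this]
    exact pricesL_getD line n (k+j) hj
  simp only [hz]
  have h0 := pricesL_getD line n k (by omega)
  have h1 := hg 1 (by omega)
  have h2 := hg 2 (by omega)
  have h3 := hg 3 (by omega)
  have h4 := hg 4 (by omega)
  norm_num at h1 h2 h3 h4
  simp only [h0, h1, h2, h3, h4]
  rfl

theorem buyer_eq (repetitions : Int) (line : Int) (t : PySem.Dict (List Int) Int) :
    (let secrets : List Int := (PySem.List.pyRange 0 repetitions 1).foldl
        (fun s _ => s ++ [get_next (PySem.List.pyGetD s (-1) 0)]) [line]
     let prices : List Int := secrets.map (fun s => PySem.Int.mod s 10)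
     let p : Int → Int := fun j => PySem.List.pyGetD prices j 0
     let st := (PySem.List.pyRange 0 ((prices.length : Int) - 4) 1).foldl
        (fun (st : PySem.Set (List Int) × PySem.Dict (List Int) Int) i =>
          let seq := [p (i+1) - p i, p (i+2) - p (i+1), p (i+3) - p (i+2), p (i+4) - p (i+3)]
          if st.1.contains seq then st
          else (st.1.add seq, st.2.insert seq (st.2.getD seq 0 + p (i+4))))
        (([] : PySem.Set (List Int)), t)
     st.2)
      = (Fb line repetitions.toNat).foldl
          (fun t q => t.insert q.1 (t.getD q.1 0 + q.2)) t := by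
  have hsec : (PySem.List.pyRange 0 repetitions 1).foldl
      (fun s _ => s ++ [get_next (PySem.List.pyGetD s (-1) 0)]) [line]
      = (List.range (repetitions.toNat + 1)).map (iterN line) := by
    rw [PySem.List.pyRange_one, List.foldl_map]
    have : (repetitions - 0).toNat = repetitions.toNat := by omega
    rw [this]
    exact secrets_fold line repetitions.toNat
  simp only [hsec, prices_eq]
  rw [bloop_stream, bstep_firsts]
  unfold Fb
  have hfun : (fun k => PySem.Set.contains ([] : PySem.Set (List Int)) k)
      = (fun (_ : List Int) => false) := by
    funext k; simp [PySem.Set.contains_eq_listContains]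
  rw [hfun]

theorem getD_addfold (P : List (List Int × Int)) (d : PySem.Dict (List Int) Int) (k : List Int) :
    (P.foldl (fun t q => t.insert q.1 (t.getD q.1 0 + q.2)) d).getD k 0
      = d.getD k 0 + sumKey P k := by
  induction P generalizing d with
  | nil => simp [sumKey]
  | cons q P ih =>
    rw [List.foldl_cons, ih]
    rw [PySem.Dict.getD_insert]
    by_cases hk : k = q.1
    · subst hk
      simp [sumKey]
      ring
    · have hb : (q.1 == k) = false := by
        simp only [beq_eq_false_iff_ne]
        exact fun h => hk h.symm
      simp [sumKey, hk, hb]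

theorem most_bananas_eqB (lines : List Int) (repetitions : Int) :
    most_bananas_alt lines repetitions =
      (PySem.Set.ofList ((Pstream lines repetitions.toNat).map (·.1))).foldl
        (fun h k => max h (sumKey (Pstream lines repetitions.toNat) k)) 0 := by
  unfold most_bananas_alt
  simp only [buyer_eq]
  have htot : lines.foldl (fun totals line => (Fb line repetitions.toNat).foldl
      (fun t q => t.insert q.1 (t.getD q.1 0 + q.2)) totals) PySem.Dict.empty
      = (Pstream lines repetitions.toNat).foldl
          (fun t q => t.insert q.1 (t.getD q.1 0 + q.2)) PySem.Dict.empty := by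
    unfold Pstream
    rw [List.foldl_flatten, List.foldl_map]
  rw [htot]
  have hnodup : ((Pstream lines repetitions.toNat).foldl
      (fun t q => t.insert q.1 (t.getD q.1 0 + q.2)) PySem.Dict.empty).keys.Nodup := by
    exact PySem.Dict.nodup_keys_foldl_insert_key (Pstream lines repetitions.toNat)
      (fun (q : List Int × Int) => q.1) (fun t q => t.getD q.1 0 + q.2) PySem.Dict.empty (by simp [PySem.Dict.keys_empty])
  rw [PySem.Dict.values_eq_map_keys _ hnodup 0, List.foldl_map]
  have hkeys : ((Pstream lines repetitions.toNat).foldl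
      (fun t q => t.insert q.1 (t.getD q.1 0 + q.2)) PySem.Dict.empty).keys
      = PySem.Set.ofList ((Pstream lines repetitions.toNat).map (·.1)) := by
    rw [PySem.Dict.keys_foldl_insert_key (Pstream lines repetitions.toNat)
      (fun (q : List Int × Int) => q.1) (fun t q => t.getD q.1 0 + q.2) PySem.Dict.empty]
    simp [PySem.Dict.keys_empty, PySem.Set.update_nil_left]
  rw [hkeys]
  apply PySem.List.foldl_congr_mem
  intro acc x _
  rw [getD_addfold]
  simp
-- A's per-buyer price-list loop
theorem foldA (m : Nat) (acc : List Int) (num : Int) :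
    (List.range m).foldl (fun (st : List Int × Int) _ =>
        (st.1 ++ [PySem.Int.mod (get_next st.2) 10], get_next st.2)) (acc, num)
      = (acc ++ (List.range m).map (fun k => PySem.Int.mod (iterN num (k+1)) 10), iterN num m) := by
  induction m with
  | zero => simp [iterN]
  | succ m ih =>
    rw [List.range_succ, List.foldl_append, ih]
    simp [iterN]

theorem numsA (line : Int) (repetitions : Int) :
    ((PySem.List.pyRange 0 repetitions 1).foldl (fun (st : List Int × Int) _ =>
        (st.1 ++ [PySem.Int.mod (get_next st.2) 10], get_next st.2))
      ([PySem.Int.mod line 10], line)).1 = pricesL line repetitions.toNat := by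
  rw [PySem.List.pyRange_one, List.foldl_map]
  have : (repetitions - 0).toNat = repetitions.toNat := by omega
  rw [this, foldA]
  unfold pricesL
  rw [List.range_succ_eq_map]
  simp only [List.map_cons, List.map_map]
  rfl

def changesL (line : Int) (n : Nat) : List Int := (List.range n).map (chg line)

theorem changesA (line : Int) (n : Nat) :
    ((pricesL line n).zip (PySem.List.slice (pricesL line n) (some 1) none)).map
        (fun p => p.2 - p.1) = changesL line n := by
  rw [PySem.List.slice_from_one]
  have htail : (pricesL line n).tail = (List.range n).map (fun k => pr line (k+1)) := by
    unfold pricesL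
    rw [List.range_succ_eq_map]
    simp [List.map_map]
  apply List.ext_getElem
  · simp [pricesL, changesL]
  · intro i h1 h2
    simp only [changesL, List.length_map, List.length_range] at h2
    simp only [List.getElem_map, List.getElem_zip, htail, changesL]
    unfold pricesL
    simp [chg]

theorem slice4 (line : Int) (n k : Nat) (hk : k + 4 ≤ n) :
    PySem.List.slice (changesL line n) (some (k : Int)) (some ((k : Int) + 4)) = seqAt line k := by
  have hcast : ((k : Int) + 4) = (((k + 4 : Nat)) : Int) := by push_cast; ring
  rw [hcast, PySem.List.slice_natCast]
  have h4 : k + 4 - k = 4 := by omega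
  rw [h4]
  apply List.ext_getElem
  · simp [changesL, seqAt]; omega
  · intro i h1 h2
    simp only [seqAt] at h2
    simp only [List.length_cons, List.length_nil] at h2
    rw [List.getElem_take, List.getElem_drop]
    simp only [changesL, List.getElem_map, List.getElem_range]
    interval_cases i <;> simp [seqAt]

-- A's per-buyer dict loop over positions = insert-if-absent fold over the stream
theorem dict_loop (line : Int) (n : Nat) :
    ((PySem.List.pyRange 0 (((changesL line n).length : Int) - 4 + 1) 1).foldl
        (fun (d : PySem.Dict (List Int) Int) i =>
          let seq := PySem.List.slice (changesL line n) (some i) (some (i + 4))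
          if d.contains seq then d
          else d.insert seq (PySem.List.pyGetD (pricesL line n) (i + 4) 0))
        PySem.Dict.empty)
      = (stream line n).foldl
          (fun d q => if d.contains q.1 then d else d.insert q.1 q.2) PySem.Dict.empty := by
  have hlen : ((changesL line n).length : Int) - 4 + 1 = (n : Int) - 3 := by
    simp [changesL]; ring
  rw [hlen, PySem.List.pyRange_one]
  have htn : ((n : Int) - 3 - 0).toNat = n - 3 := by omega
  rw [htn, List.foldl_map]
  unfold stream
  rw [List.foldl_map]
  apply PySem.List.foldl_congr_mem
  intro acc k hk
  have hk4 : k + 4 ≤ n := by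
    have := List.mem_range.mp hk; omega
  have hz : (0 : Int) + (k : Int) = ((k : Nat) : Int) := by ring
  simp only [hz]
  have hsl := slice4 line n k hk4
  have hval : PySem.List.pyGetD (pricesL line n) (((k : Nat) : Int) + 4) 0 = pr line (k + 4) := by
    have : ((k : Nat) : Int) + 4 = (((k + 4 : Nat)) : Int) := by push_cast; ring
    rw [this]
    exact pricesL_getD line n (k+4) hk4
  simp only [hsl, hval]

theorem seen_false_of_mem_firsts (seen : List Int → Bool) (ps : List (List Int × Int)) :
    ∀ q ∈ firsts seen ps, seen q.1 = false := by
  induction ps generalizing seen with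
  | nil => simp [firsts]
  | cons p ps ih =>
    intro q hq
    by_cases hp : seen p.1
    · simp only [firsts, hp, if_true] at hq
      exact ih seen q hq
    · simp only [firsts, hp, Bool.false_eq_true, if_false, List.mem_cons] at hq
      rcases hq with hq | hq
      · subst hq; simpa using hp
      · have := ih _ q hq
        simp only [Bool.or_eq_false_iff] at this
        exact this.2

theorem nodup_firsts_keys (seen : List Int → Bool) (ps : List (List Int × Int)) :
    ((firsts seen ps).map (·.1)).Nodup := by
  induction ps generalizing seen with
  | nil => simp [firsts]
  | cons p ps ih =>
    by_cases hp : seen p.1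
    · simp only [firsts, hp, if_true]; exact ih seen
    · simp only [firsts, hp, Bool.false_eq_true, if_false, List.map_cons, List.nodup_cons]
      refine ⟨?_, ih _⟩
      intro hmem
      rcases List.mem_map.mp hmem with ⟨q, hq, hq1⟩
      have := seen_false_of_mem_firsts _ _ q hq
      rw [hq1] at this
      simp at this

theorem astep_firsts (ps : List (List Int × Int)) (d : PySem.Dict (List Int) Int) :
    ps.foldl (fun d q => if d.contains q.1 then d else d.insert q.1 q.2) d
      = (firsts (fun k => d.contains k) ps).foldl (fun d q => d.insert q.1 q.2) d := by
  induction ps generalizing d with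
  | nil => simp [firsts]
  | cons q ps ih =>
    by_cases hc : d.contains q.1
    · simp only [List.foldl_cons, firsts, hc, if_true]
      exact ih d
    · simp only [List.foldl_cons, firsts, hc, Bool.false_eq_true, if_false]
      rw [ih]
      have hfun : (fun k => (d.insert q.1 q.2).contains k) = (fun k => k == q.1 || d.contains k) := by
        funext k; exact PySem.Dict.contains_insert d q.1 k q.2
      rw [hfun]

theorem used_fold (ks : List (List Int)) (g : List Int → Int) (s : PySem.Set (List Int)) (h : Int) :
    (ks.foldl (fun (st : PySem.Set (List Int) × Int) seq =>
        if st.1.contains seq then st else (st.1.add seq, max st.2 (g seq))) (s, h)).2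
      = (firstsK (fun k => s.contains k) ks).foldl (fun h k => max h (g k)) h := by
  induction ks generalizing s h with
  | nil => simp [firstsK]
  | cons k ks ih =>
    by_cases hc : s.contains k
    · simp only [List.foldl_cons, firstsK, hc, if_true]
      exact ih s h
    · simp only [List.foldl_cons, firstsK, hc, Bool.false_eq_true, if_false]
      rw [ih]
      have hfun : (fun j => (s.add k).contains j) = (fun j => j == k || s.contains j) := by
        rw [set_contains_add]
      rw [hfun]

theorem sumKey_not_mem (ps : List (List Int × Int)) (k : List Int)
    (h : k ∉ ps.map (·.1)) : sumKey ps k = 0 := by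
  unfold sumKey
  have : ps.filter (fun q => q.1 == k) = [] := by
    apply List.filter_eq_nil_iff.mpr
    intro q hq
    simp only [beq_iff_eq]
    intro hq1
    exact h (List.mem_map.mpr ⟨q, hq, hq1⟩)
  rw [this]; simp

theorem sumKey_of_nodup (ps : List (List Int × Int)) (hnd : (ps.map (·.1)).Nodup)
    (q : List Int × Int) (hq : q ∈ ps) : sumKey ps q.1 = q.2 := by
  induction ps with
  | nil => simp at hq
  | cons p ps ih =>
    simp only [List.map_cons, List.nodup_cons] at hnd
    rcases List.mem_cons.mp hq with hq | hq
    · subst hq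
      unfold sumKey
      simp only [List.filter_cons, beq_self_eq_true, if_true, List.map_cons, List.sum_cons]
      have : sumKey ps q.1 = 0 := sumKey_not_mem ps q.1 hnd.1
      unfold sumKey at this
      rw [this]; ring
    · have hne : (p.1 == q.1) = false := by
        simp only [beq_eq_false_iff_ne]
        intro he
        exact hnd.1 (he ▸ List.mem_map.mpr ⟨q, hq, rfl⟩)
      unfold sumKey
      simp only [List.filter_cons, hne, Bool.false_eq_true, if_false]
      exact ih hnd.2 hq

theorem sumKey_append (a b : List (List Int × Int)) (k : List Int) :
    sumKey (a ++ b) k = sumKey a k + sumKey b k := by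
  simp [sumKey, List.filter_append]

def Dline (line : Int) (n : Nat) : PySem.Dict (List Int) Int :=
  (stream line n).foldl (fun d q => if d.contains q.1 then d else d.insert q.1 q.2) PySem.Dict.empty

theorem Dline_items (line : Int) (n : Nat) : (Dline line n).items = Fb line n := by
  unfold Dline
  rw [astep_firsts]
  have hfun : (fun k => (PySem.Dict.empty : PySem.Dict (List Int) Int).contains k)
      = (fun (_ : List Int) => false) := by
    funext k; exact PySem.Dict.contains_empty k
  rw [hfun]
  have := PySem.Dict.items_foldl_insert_fresh (firsts (fun _ => false) (stream line n))
    (fun q => q.1) (fun q => q.2) PySem.Dict.empty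
    (fun a _ => PySem.Dict.contains_empty a.1) (nodup_firsts_keys _ _)
  rw [this]
  rw [show (PySem.Dict.empty : PySem.Dict (List Int) Int).items = [] from rfl]
  simp [Fb]

theorem Dline_keys (line : Int) (n : Nat) : (Dline line n).keys = (Fb line n).map (·.1) := by
  simp only [PySem.Dict.keys, Dline_items]

theorem Dline_nodup (line : Int) (n : Nat) : (Dline line n).keys.Nodup := by
  rw [Dline_keys]; exact nodup_firsts_keys _ _

theorem gain_step (line : Int) (n : Nat) (k : List Int) (res : Int) :
    (if (Dline line n).contains k then res + (Dline line n).getD k 0 else res)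
      = res + sumKey (Fb line n) k := by
  by_cases hm : k ∈ (Fb line n).map (·.1)
  · have hc : (Dline line n).contains k := by
      rw [PySem.Dict.contains_iff_mem_keys, Dline_keys]; exact hm
    rcases List.mem_map.mp hm with ⟨q, hq, hq1⟩
    have hitem : (k, q.2) ∈ (Dline line n).items := by
      rw [Dline_items]
      have : (k, q.2) = q := by rw [← hq1]
      rw [this]; exact hq
    rw [if_pos hc, PySem.Dict.getD_of_mem_items _ hitem (Dline_nodup line n) 0]
    have := sumKey_of_nodup (Fb line n) (nodup_firsts_keys _ _) q hq
    rw [hq1] at this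
    rw [this]
  · have hc : ¬ (Dline line n).contains k = true := by
      rw [PySem.Dict.contains_iff_mem_keys, Dline_keys]; exact hm
    rw [if_neg hc, sumKey_not_mem _ _ hm, add_zero]

theorem foldl_add_sumKey (L : List (List (List Int × Int))) (k : List Int) (c : Int) :
    L.foldl (fun res F => res + sumKey F k) c = c + sumKey L.flatten k := by
  induction L generalizing c with
  | nil => simp [sumKey]
  | cons F L ih =>
    rw [List.foldl_cons, ih, List.flatten_cons, sumKey_append]
    ring

theorem gain_eq (lines : List Int) (n : Nat) (k : List Int) :
    count_gain (lines.map (fun line => Dline line n)) k = sumKey (Pstream lines n) k := by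
  unfold count_gain
  rw [List.foldl_map]
  have : lines.foldl (fun res line =>
      if (Dline line n).contains k then res + (Dline line n).getD k 0 else res) 0
      = lines.foldl (fun res line => res + sumKey (Fb line n) k) 0 :=
    PySem.List.foldl_congr_mem _ _ _ _ (fun res line _ => gain_step line n k res)
  rw [this]
  have h2 : (lines.map (fun line => Fb line n)).foldl (fun res F => res + sumKey F k) 0
      = lines.foldl (fun res line => res + sumKey (Fb line n) k) 0 := List.foldl_map
  rw [← h2, foldl_add_sumKey]
  simp [Pstream]

theorem most_bananas_eqA (lines : List Int) (repetitions : Int) :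
    most_bananas lines repetitions =
      (firstsK (fun _ => false) ((Pstream lines repetitions.toNat).map (·.1))).foldl
        (fun h k => max h (sumKey (Pstream lines repetitions.toNat) k)) 0 := by
  unfold most_bananas
  simp only [PySem.List.foldl_append_singleton_eq_map, List.nil_append, numsA, List.map_map]
  simp only [Function.comp_def, changesA]
  have hseqs : (PySem.List.enumerate (lines.map (fun line => changesL line repetitions.toNat)) 0).map
      (fun p => (PySem.List.pyRange 0 ((p.2.length : Int) - 4 + 1) 1).foldl
        (fun (d : PySem.Dict (List Int) Int) i =>
          let seq := PySem.List.slice p.2 (some i) (some (i + 4))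
          if d.contains seq then d
          else d.insert seq (PySem.List.pyGetD
            (PySem.List.pyGetD (lines.map (fun line => pricesL line repetitions.toNat)) p.1 [])
            (i + 4) 0))
        PySem.Dict.empty)
      = lines.map (fun line => Dline line repetitions.toNat) := by
    apply List.ext_getElem
    · simp [PySem.List.length_enumerate]
    · intro j h1 h2
      simp only [List.length_map] at h2
      rw [List.getElem_map, List.getElem_map]
      rw [PySem.List.getElem_enumerate]
      simp only [List.getElem_map]
      have hbn : PySem.List.pyGetD (lines.map (fun line => pricesL line repetitions.toNat))
          ((0 : Int) + (j : Int)) [] = pricesL lines[j] repetitions.toNat := by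
        rw [show (0 : Int) + (j : Int) = ((j : Nat) : Int) from by ring,
          PySem.List.pyGetD_natCast, List.getD_eq_getElem _ _ (by simpa using h2),
          List.getElem_map]
      simp only [hbn]
      exact dict_loop lines[j] repetitions.toNat
  rw [hseqs]
  have hflat : (lines.map (fun line => Dline line repetitions.toNat)).foldl
      (fun (st : PySem.Set (List Int) × Int) seqs =>
        seqs.keys.foldl (fun (st : PySem.Set (List Int) × Int) seq =>
          if st.1.contains seq then st
          else (st.1.add seq, max st.2
            (count_gain (lines.map (fun line => Dline line repetitions.toNat)) seq))) st)
      (([] : PySem.Set (List Int)), 0)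
      = (((lines.map (fun line => Dline line repetitions.toNat)).map PySem.Dict.keys).flatten).foldl
          (fun (st : PySem.Set (List Int) × Int) seq =>
            if st.1.contains seq then st
            else (st.1.add seq, max st.2
              (count_gain (lines.map (fun line => Dline line repetitions.toNat)) seq)))
          (([] : PySem.Set (List Int)), 0) := by
    simp only [List.foldl_flatten, List.foldl_map]
  rw [hflat, used_fold]
  have hks : ((lines.map (fun line => Dline line repetitions.toNat)).map PySem.Dict.keys).flatten
      = (Pstream lines repetitions.toNat).map (·.1) := by
    rw [List.map_map]
    simp only [Function.comp_def, Dline_keys]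
    unfold Pstream
    rw [List.map_flatten, List.map_map]
    simp [Function.comp_def]
  rw [hks]
  have hfun : (fun k => PySem.Set.contains ([] : PySem.Set (List Int)) k)
      = (fun (_ : List Int) => false) := by
    funext k; simp [PySem.Set.contains_eq_listContains]
  rw [hfun]
  apply PySem.List.foldl_congr_mem
  intro acc k _
  rw [gain_eq]

theorem mem_firstsK (seen : List Int → Bool) (ks : List (List Int)) (x : List Int) :
    x ∈ firstsK seen ks ↔ x ∈ ks ∧ seen x = false := by
  induction ks generalizing seen with
  | nil => simp [firstsK]
  | cons k ks ih =>
    by_cases h : seen k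
    · simp only [firstsK, h, if_true, ih, List.mem_cons]
      constructor
      · rintro ⟨hx, hs⟩; exact ⟨Or.inr hx, hs⟩
      · rintro ⟨hx | hx, hs⟩
        · subst hx; simp [h] at hs
        · exact ⟨hx, hs⟩
    · rw [show firstsK seen (k :: ks) = k :: firstsK (fun j => j == k || seen j) ks from by
        simp [firstsK, h]]
      simp only [List.mem_cons, ih]
      by_cases hx : x = k
      · subst hx; simp [h]
      · simp [hx]

theorem foldl_max_attained (l : List (List Int)) (g : List Int → Int) (c : Int) :
    l.foldl (fun h k => max h (g k)) c = c ∨ ∃ x ∈ l, l.foldl (fun h k => max h (g k)) c = g x := by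
  induction l generalizing c with
  | nil => simp
  | cons a l ih =>
    rcases ih (max c (g a)) with h | ⟨x, hx, hg⟩
    · rcases max_choice c (g a) with hm | hm
      · left; simpa [hm] using h
      · right; exact ⟨a, by simp, by simpa [hm] using h⟩
    · right; exact ⟨x, by simp [hx], by simpa using hg⟩

theorem foldl_max_mem_congr (l1 l2 : List (List Int)) (g : List Int → Int) (c : Int)
    (h : ∀ x, x ∈ l1 ↔ x ∈ l2) :
    l1.foldl (fun h k => max h (g k)) c = l2.foldl (fun h k => max h (g k)) c := by
  obtain ⟨hc1, hm1⟩ := PySem.List.le_foldl_max_int l1 g c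
  obtain ⟨hc2, hm2⟩ := PySem.List.le_foldl_max_int l2 g c
  apply le_antisymm
  · rcases foldl_max_attained l1 g c with he | ⟨x, hx, he⟩
    · rw [he]; exact hc2
    · rw [he]; exact hm2 x ((h x).mp hx)
  · rcases foldl_max_attained l2 g c with he | ⟨x, hx, he⟩
    · rw [he]; exact hc1
    · rw [he]; exact hm1 x ((h x).mpr hx)

-- ===== VERDICT (by name: the statement is the Claim_ definition above) =====
theorem most_bananas_spec : Claim_equal_most_bananas := by
  intro lines repetitions _
  unfold Spec_most_bananas
  rw [most_bananas_eqA, most_bananas_eqB]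
  apply foldl_max_mem_congr
  intro x
  rw [mem_firstsK, PySem.Set.mem_ofList]
  simp
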